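-- pv_equiv track=rewrite | github.com/danieledge/DataK9 | validation_framework/profiler/ml_analyzer.py | _extract_format_pattern
-- ===== SOURCE A (Python) =====
-- def _extract_format_pattern(value: str) -> str:
--     """Convert value to format pattern (A=alpha, 9=digit, _=space)."""
--     if not value or value.lower() == 'nan':
--         return "NULL"
--
--     pattern = []
--     for c in str(value):
--         if c.isalpha():
--             pattern.append("A")
--         elif c.isdigit():
--             pattern.append("9")
--         elif c.isspace():
--             pattern.append("_")
--         else:
--             pattern.append(c)
--
--     # Compress repeating characters
--     if not pattern:
--         return "NULL"
--
--     compressed = []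
--     current_char = pattern[0]
--     count = 1
--
--     for c in pattern[1:]:
--         if c == current_char:
--             count += 1
--         else:
--             compressed.append(current_char + (str(count) if count > 1 else ""))
--             current_char = c
--             count = 1
--
--     compressed.append(current_char + (str(count) if count > 1 else ""))
--
--     return "".join(compressed)
-- ===== SOURCE B (Python) =====
-- def _extract_format_pattern(value: str) -> str:
--     """Convert value to format pattern (A=alpha, 9=digit, _=space)."""
--     if not value or value.lower() == 'nan':
--         return "NULL"
--
--     def classify(c):
--         if c.isalpha():
--             return "A"
--         if c.isdigit():
--             return "9"
--         if c.isspace():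
--             return "_"
--         return c
--
--     syms = [classify(c) for c in str(value)]
--     n = len(syms)
--     # change-point indices: positions where a new run of equal symbols starts
--     bounds = [i for i in range(n) if i == 0 or syms[i] != syms[i - 1]] + [n]
--     return "".join(
--         syms[a] + (str(b - a) if b - a > 1 else "")
--         for a, b in zip(bounds, bounds[1:]))
-- ===== Notes on version B (the rewrite author's own statement) =====
-- stated objective: alternative
-- what changed: Replaces A's stateful streaming run-length encoder (current_char/count accumulator over a precomputed pattern list) with a staged change-point computation: a comprehension lists the boundary indices where the classified symbol differs from its predecessor, and the output is assembled from consecutive boundary pairs via zip, with run lengths obtained as index differences instead of a maintained counter.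
import Mathlib
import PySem

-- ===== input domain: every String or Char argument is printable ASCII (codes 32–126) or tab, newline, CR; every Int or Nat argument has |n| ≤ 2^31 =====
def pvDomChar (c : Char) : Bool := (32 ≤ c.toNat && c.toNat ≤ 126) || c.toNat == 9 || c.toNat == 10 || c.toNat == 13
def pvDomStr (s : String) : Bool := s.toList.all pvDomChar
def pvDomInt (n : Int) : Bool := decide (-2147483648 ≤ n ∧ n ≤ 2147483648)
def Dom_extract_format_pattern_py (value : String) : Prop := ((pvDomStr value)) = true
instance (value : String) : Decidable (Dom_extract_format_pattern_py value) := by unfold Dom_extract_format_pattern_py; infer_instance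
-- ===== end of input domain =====

-- B replaces A's stateful streaming run-length encoder with a staged change-point computation:
-- it lists the boundary indices where the classified symbol changes, then emits one segment per
-- consecutive boundary pair (objective: alternative decomposition, same cost).

-- ===== PORT A =====
-- the run-length-compression loop `for c in pattern[1:]` with state (current_char, count, compressed)
def pvCompressA : List Char → Char → Nat → List String → List String
  | [], cur, cnt, acc =>
      acc ++ [String.ofList [cur] ++ (if cnt > 1 then PySem.Int.toStr (cnt : Int) else "")]
  | c :: rest, cur, cnt, acc =>
      if c == cur then pvCompressA rest cur (cnt + 1) acc
      else pvCompressA rest c 1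
        (acc ++ [String.ofList [cur] ++ (if cnt > 1 then PySem.Int.toStr (cnt : Int) else "")])

def extract_format_pattern_py (value : String) : String :=
  if value == "" || PySem.Str.lower value == "nan" then "NULL"
  else
    let pattern := value.toList.map (fun c =>
      if PySem.Chars.isalpha c then 'A'
      else if PySem.Chars.isdigit c then '9'
      else if PySem.Chars.isspace c then '_'
      else c)
    match pattern with
    | [] => "NULL"
    | p0 :: rest => PySem.Str.join "" (pvCompressA rest p0 1 [])

-- ===== PORT B =====
def pvClassifyB (c : Char) : Char :=
  if PySem.Chars.isalpha c then 'A'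
  else if PySem.Chars.isdigit c then '9'
  else if PySem.Chars.isspace c then '_'
  else c

def extract_format_pattern_py_alt (value : String) : String :=
  if value == "" || PySem.Str.lower value == "nan" then "NULL"
  else
    let syms := value.toList.map pvClassifyB
    let n := syms.length
    -- change-point indices: positions where a new run of equal symbols starts, plus the end
    let bounds := ((List.range n).filter
      (fun i => i == 0 || !(syms.getD i ' ' == syms.getD (i - 1) ' '))) ++ [n]
    PySem.Str.join "" ((bounds.zip bounds.tail).map (fun ab =>
      String.ofList [syms.getD ab.1 ' '] ++
        (if ab.2 - ab.1 > 1 then PySem.Int.toStr ((ab.2 - ab.1 : Nat) : Int) else "")))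

-- ===== PRECONDITION & SPEC =====
def Spec_extract_format_pattern_py (value : String) (out : String) : Prop := out = extract_format_pattern_py_alt value
instance (value : String) (out : String) : Decidable (Spec_extract_format_pattern_py value out) := by unfold Spec_extract_format_pattern_py; infer_instance

-- ===== CLAIM (what is proved, stated in full; the proofs are below) =====
def Claim_equal_extract_format_pattern_py : Prop := ∀ (value : String), Dom_extract_format_pattern_py value → Spec_extract_format_pattern_py value (extract_format_pattern_py value)

-- ===== LEMMAS AND PROOFS =====

-- one emitted segment: symbol plus count suffix (omitted for a run of 1)
def pvRender (c : Char) (m : Nat) : String :=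
  String.ofList [c] ++ (if m > 1 then PySem.Int.toStr (m : Int) else "")

-- canonical run decomposition of a classified list, the middle point of the proof
def pvGroupsC : List Char → List String
  | [] => []
  | c :: t =>
      pvRender c ((t.takeWhile (· == c)).length + 1) :: pvGroupsC (t.dropWhile (· == c))
  termination_by l => l.length
  decreasing_by
    have h := List.length_dropWhile_le (p := fun d => d == c) (l := t)
    simp only [List.length_cons]; omega

-- B's change-point predicate, boundary list and segment emitter, as named functions
def pvP (l : List Char) (i : Nat) : Bool :=
  i == 0 || !(l.getD i ' ' == l.getD (i - 1) ' ')

def pvBounds (l : List Char) : List Nat :=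
  ((List.range l.length).filter (pvP l)) ++ [l.length]

def pvEmit (l : List Char) (ab : Nat × Nat) : String :=
  String.ofList [l.getD ab.1 ' '] ++
    (if ab.2 - ab.1 > 1 then PySem.Int.toStr ((ab.2 - ab.1 : Nat) : Int) else "")

-- unfolding equation of pvGroupsC on a cons cell
theorem pvGroupsC_cons (c : Char) (t : List Char) :
    pvGroupsC (c :: t) =
      pvRender c ((t.takeWhile (· == c)).length + 1) :: pvGroupsC (t.dropWhile (· == c)) := by
  rw [pvGroupsC.eq_def]

-- A's compression loop on the classified tail is the canonical run decomposition.
theorem pvCompressA_eq (l : List Char) : ∀ (k : Char) (cnt : Nat) (acc : List String),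
    pvCompressA l k cnt acc =
      acc ++ pvRender k (cnt + (l.takeWhile (· == k)).length)
        :: pvGroupsC (l.dropWhile (· == k)) := by
  induction l with
  | nil =>
    intro k cnt acc
    rw [pvGroupsC.eq_def]
    simp [pvCompressA, pvRender]
  | cons d t ih =>
    intro k cnt acc
    by_cases h : d = k
    · have hb : (d == k) = true := by simp [h]
      simp only [pvCompressA, hb, if_true, List.takeWhile_cons, List.dropWhile_cons,
        List.length_cons]
      rw [ih k (cnt + 1) acc]
      have e : cnt + 1 + (List.takeWhile (fun x => x == k) t).length
          = cnt + ((List.takeWhile (fun x => x == k) t).length + 1) := by omega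
      rw [e]
    · have hb : (d == k) = false := by simp [h]
      simp only [pvCompressA, hb, Bool.false_eq_true, if_false, List.takeWhile_cons,
        List.dropWhile_cons, List.length_nil]
      rw [ih d 1 _]
      conv_rhs => rw [pvGroupsC.eq_def]
      have e : 1 + (List.takeWhile (fun e => e == d) t).length
          = (List.takeWhile (fun e => e == d) t).length + 1 := by omega
      simp [pvRender, e, List.append_assoc]

-- every position inside the leading run reads the run's symbol
theorem pvGetD_prefix (c : Char) (t : List Char) :
    ∀ i < (t.takeWhile (· == c)).length + 1,
      (c :: t).getD i ' ' = c := by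
  intro i hi
  have hsplit : (c :: t) = (c :: t.takeWhile (· == c)) ++ t.dropWhile (· == c) := by
    simp [List.takeWhile_append_dropWhile]
  rw [hsplit, List.getD_append _ _ _ i (by simpa using hi)]
  have hlen : i < (c :: t.takeWhile (· == c)).length := by simpa using hi
  rw [List.getD_eq_getElem _ _ hlen]
  have hmem : (c :: t.takeWhile (· == c))[i] ∈ c :: t.takeWhile (· == c) :=
    List.getElem_mem hlen
  rcases List.mem_cons.mp hmem with h | h
  · exact h
  · exact by simpa using List.mem_takeWhile_imp h

-- positions past the leading run read the rest
theorem pvGetD_shift (u v : List Char) (j : Nat) :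
    (u ++ v).getD (u.length + j) ' ' = v.getD j ' ' := by
  rw [List.getD_append_right _ _ _ _ (Nat.le_add_right _ _)]
  simp

-- the emitter only looks at the string past the prefix when both indices are shifted
theorem pvEmit_shift (u v : List Char) (a b : Nat) :
    pvEmit (u ++ v) (u.length + a, u.length + b) = pvEmit v (a, b) := by
  simp only [pvEmit, pvGetD_shift]
  have : u.length + b - (u.length + a) = b - a := by omega
  rw [this]

-- the boundary list of c :: t is 0 followed by the rest's boundaries shifted by the first run
theorem pvBounds_cons (c : Char) (t : List Char) :
    pvBounds (c :: t) =
      0 :: (pvBounds (t.dropWhile (· == c))).map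
        (fun x => (t.takeWhile (· == c)).length + 1 + x) := by
  set w := t.takeWhile (· == c) with hw
  set r := t.dropWhile (· == c) with hr
  set m := w.length + 1 with hm
  have hlen : (c :: t).length = m + r.length := by
    have := List.takeWhile_append_dropWhile (p := fun x => x == c) (l := t)
    have : w.length + r.length = t.length := by
      rw [← List.length_append]; rw [hw, hr]; simp [List.takeWhile_append_dropWhile]
    simp [hm]; omega
  unfold pvBounds
  rw [hlen, List.range_add]
  rw [List.filter_append]
  -- first block: only index 0 survives
  have h1 : (List.range m).filter (pvP (c :: t)) = [0] := by
    have hcongr : ∀ i ∈ List.range m, pvP (c :: t) i = (i == 0) := by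
      intro i hi
      have him : i < m := List.mem_range.mp hi
      by_cases h0 : i = 0
      · simp [pvP, h0]
      · have h1' : 1 ≤ i := Nat.one_le_iff_ne_zero.mpr h0
        have ha : (c :: t).getD i ' ' = c :=
          pvGetD_prefix c t i (by rw [← hw, ← hm]; exact him)
        have hb : (c :: t).getD (i - 1) ' ' = c :=
          pvGetD_prefix c t (i - 1) (by rw [← hw, ← hm]; omega)
        have : pvP (c :: t) i = ((i == 0) || !(c == c)) := by rw [pvP, ha, hb]
        rw [this]
        simp
    rw [List.filter_congr hcongr]
    obtain ⟨k, hk⟩ : ∃ k, m = k + 1 := ⟨w.length, rfl⟩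
    rw [hk, List.range_succ_eq_map]
    rw [List.filter_cons_of_pos (by simp)]
    rw [List.filter_map]
    rw [List.filter_eq_nil_iff.mpr (fun a _ => by simp)]
    simp
  -- second block: shifted copy of the rest's boundaries
  have hshiftget : ∀ j, (c :: t).getD (m + j) ' ' = r.getD j ' ' := by
    intro j
    have hsplit : (c :: t) = (c :: w) ++ r := by
      simp [hw, hr, List.takeWhile_append_dropWhile]
    have hlw : (c :: w).length = m := by simp [hm]
    rw [hsplit, ← hlw, pvGetD_shift]
  have h2 : (List.map (fun x => m + x) (List.range r.length)).filter (pvP (c :: t))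
      = List.map (fun x => m + x) ((List.range r.length).filter (pvP r)) := by
    rw [List.filter_map]
    congr 1
    apply List.filter_congr
    intro j hj
    have hjr : j < r.length := List.mem_range.mp hj
    have hrne : r ≠ [] := by intro h; rw [h] at hjr; simp at hjr
    by_cases hj0 : j = 0
    · subst hj0
      obtain ⟨a, r', hrc2⟩ := List.exists_cons_of_ne_nil hrne
      have hhead : (r.getD 0 ' ' == c) = false := by
        have h := List.head_dropWhile_not (fun x => x == c) (l := t)
          (by rw [← hr]; exact hrne)
        simp only [← hr] at h
        have hr0 : r.getD 0 ' ' = r.head hrne := by simp [hrc2]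
        rw [hr0]; exact h
      have hga : (c :: t).getD (m + 0) ' ' = r.getD 0 ' ' := hshiftget 0
      have hgb : (c :: t).getD (m + 0 - 1) ' ' = c :=
        pvGetD_prefix c t (m + 0 - 1) (by rw [← hw, ← hm]; omega)
      have hm0 : (m + 0 == 0) = false := by simp [hm]
      show pvP (c :: t) (m + 0) = pvP r 0
      rw [pvP, pvP, hga, hgb, hm0, hhead]
      simp
    · have h1' : 1 ≤ j := Nat.one_le_iff_ne_zero.mpr hj0
      have hga : (c :: t).getD (m + j) ' ' = r.getD j ' ' := hshiftget j
      have hgb : (c :: t).getD (m + j - 1) ' ' = r.getD (j - 1) ' ' := by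
        have : m + j - 1 = m + (j - 1) := by omega
        rw [this, hshiftget]
      simp only [Function.comp, pvP]
      rw [hga, hgb]
      have hm0 : (m + j == 0) = false := by simp [hm]
      have hj0' : (j == 0) = false := by simp [hj0]
      simp [hm0, hj0']
  rw [h1, h2]
  simp [List.map_append]

-- B's boundary-pair emission is the canonical run decomposition.
theorem pvZip_emit (n : Nat) : ∀ l : List Char, l.length ≤ n →
    ((pvBounds l).zip (pvBounds l).tail).map (pvEmit l) = pvGroupsC l := by
  induction n with
  | zero =>
    intro l hl
    have : l = [] := List.length_eq_zero_iff.mp (Nat.le_zero.mp hl)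
    subst this
    rw [pvGroupsC.eq_def]
    simp [pvBounds]
  | succ n ih =>
    intro l hl
    cases l with
    | nil =>
      rw [pvGroupsC.eq_def]
      simp [pvBounds]
    | cons c t =>
      set w := t.takeWhile (· == c) with hw
      set r := t.dropWhile (· == c) with hr
      set m := w.length + 1 with hm
      have hb := pvBounds_cons c t
      rw [← hw, ← hr, ← hm] at hb
      have hrlen : r.length ≤ n := by
        have h1 := List.length_dropWhile_le (p := fun x => x == c) (l := t)
        have h2 : (c :: t).length ≤ n + 1 := hl
        simp only [List.length_cons] at h2
        rw [hr]; omega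
      have hsplit : (c :: t) = (c :: w) ++ r := by
        simp [hw, hr, List.takeWhile_append_dropWhile]
      have hlw : (c :: w).length = m := by simp [hm]
      have hemit0 : pvEmit (c :: t) (0, m) = pvRender c m := by
        simp [pvEmit, pvRender]
      have hgr : pvGroupsC (c :: t) = pvRender c m :: pvGroupsC r := by
        rw [pvGroupsC_cons]
      cases hrc : r with
      | nil =>
        have hbr : pvBounds r = [0] := by simp [pvBounds, hrc]
        rw [hb, hbr]
        simp only [List.map_cons, List.map_nil, List.zip_cons_cons, List.tail_cons]
        rw [hgr, hrc]
        rw [pvGroupsC.eq_def]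
        simp only [List.zip_nil_right, List.map_nil]
        simp only [Nat.add_zero]
        rw [hemit0]
      | cons a r' =>
        -- the rest's boundary list starts with 0
        obtain ⟨bs, hbs⟩ : ∃ bs, pvBounds r = 0 :: bs := by
          refine ⟨((List.map Nat.succ (List.range r'.length)).filter (pvP r)) ++ [r.length], ?_⟩
          have hp0 : pvP r 0 = true := by simp [pvP]
          have hlen1 : r.length = r'.length + 1 := by rw [hrc]; simp
          unfold pvBounds
          rw [hlen1, List.range_succ_eq_map, List.filter_cons, hp0]
          rfl
        rw [hb, hbs]
        simp only [List.map_cons, List.zip_cons_cons, List.tail_cons]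
        have hf0 : w.length + 1 + 0 = m := by omega
        rw [hf0]
        have hzip : (m :: List.map (fun x => w.length + 1 + x) bs).zip
            (List.map (fun x => w.length + 1 + x) bs)
            = List.map (Prod.map (fun x => w.length + 1 + x) (fun x => w.length + 1 + x))
                ((0 :: bs).zip bs) := by
          have : m :: List.map (fun x => w.length + 1 + x) bs
              = List.map (fun x => w.length + 1 + x) (0 :: bs) := rfl
          rw [this, List.zip_map]
        rw [hzip]
        simp only [List.map_map]
        rw [hemit0, hgr]
        congr 1
        have hshift : ∀ p : Nat × Nat,
            (pvEmit (c :: t) ∘ Prod.map (fun x => w.length + 1 + x) (fun x => w.length + 1 + x)) p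
              = pvEmit r p := by
          rintro ⟨a', b'⟩
          simp only [Function.comp, Prod.map]
          rw [hsplit]
          have e1 : w.length + 1 + a' = (c :: w).length + a' := by simp
          have e2 : w.length + 1 + b' = (c :: w).length + b' := by simp
          rw [e1, e2, pvEmit_shift]
        rw [List.map_congr_left (fun p _ => hshift p)]
        have := ih r hrlen
        rw [hbs] at this
        simpa using this

-- ===== VERDICT (by name: the statement is the Claim_ definition above) =====
theorem extract_format_pattern_py_spec : Claim_equal_extract_format_pattern_py := by
  intro value _
  unfold Spec_extract_format_pattern_py extract_format_pattern_py extract_format_pattern_py_alt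
  by_cases hg : (value == "" || PySem.Str.lower value == "nan") = true
  · rw [if_pos hg, if_pos hg]
  · rw [if_neg hg, if_neg hg]
    cases hv : value.toList with
    | nil =>
      exfalso
      apply hg
      have hv' : value = "" := by simpa [String.toList_eq_nil_iff] using hv
      simp [hv']
    | cons c rest =>
      show PySem.Str.join "" (match (c :: rest).map pvClassifyB with
        | [] => ([] : List String)
        | p0 :: r => pvCompressA r p0 1 []) = _
      show PySem.Str.join "" (pvCompressA (rest.map pvClassifyB) (pvClassifyB c) 1 []) = _
      rw [pvCompressA_eq]
      have hB : ((pvBounds ((c :: rest).map pvClassifyB)).zip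
            (pvBounds ((c :: rest).map pvClassifyB)).tail).map
            (pvEmit ((c :: rest).map pvClassifyB))
          = pvGroupsC ((c :: rest).map pvClassifyB) :=
        pvZip_emit ((c :: rest).map pvClassifyB).length _ le_rfl
      show _ = PySem.Str.join ""
        (((pvBounds ((c :: rest).map pvClassifyB)).zip
            (pvBounds ((c :: rest).map pvClassifyB)).tail).map
          (pvEmit ((c :: rest).map pvClassifyB)))
      rw [hB]
      simp only [List.map_cons]
      rw [pvGroupsC_cons]
      simp only [List.nil_append]
      rw [Nat.add_comm 1]
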